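-- pv_equiv track=rewrite | github.com/KyleFennell/AdventOfCode2020 | 2021/Day11/solution.py | process_flash
-- ===== SOURCE A (Python) =====
-- def process_flash(step):
--     light = [[0]*len(step[x]) for x in range(len(step))]
--     for x in range(len(step)):
--         for y in range(len(step[x])):
--             if step[x][y] <= 9:
--                 continue
--             if x > 0:
--                 if y > 0:
--                     light[x-1][y-1] = light[x-1][y-1] + 1
--                 if y < len(step[x])-1:
--                     light[x-1][y+1] += 1
--                 light[x-1][y] += 1
--             if x < len(step)-1:
--                 if y > 0:
--                     light[x+1][y-1] += 1
--                 if y < len(step[x])-1: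
--                     light[x+1][y+1] += 1
--                 light[x+1][y] += 1
--             if y > 0:
--                 light[x][y-1] += 1
--             if y < len(step[x])-1:
--                 light[x][y+1] += 1
--             step[x][y] = 0
--     next_step = [[0]*len(step[x]) for x in range(len(step))]
--     for x in range(len(step)):
--         for y in range(len(step[x])):
--             next_step[x][y] = (step[x][y] + light[x][y]) if step[x][y] != 0 else 0
--     return next_step
-- ===== SOURCE B (Python) =====
-- def process_flash(step):
--     flashes = [(x, y) for x in range(len(step))
--                       for y in range(len(step[x])) if step[x][y] > 9]
--     for (x, y) in flashes:
--         step[x][y] = 0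
--     return [[0 if step[x][y] == 0 else
--              step[x][y] + sum(1 for (fx, fy) in flashes
--                               if abs(fx - x) <= 1 and abs(fy - y) <= 1
--                               and (fx, fy) != (x, y))
--              for y in range(len(step[x]))]
--             for x in range(len(step))]
-- ===== Notes on version B (the rewrite author's own statement) =====
-- stated objective: alternative
-- what changed: B collects the list of flashing cells once and, for each output cell, counts adjacent flashers from that list (gather), instead of A's scattering of +1 increments into an auxiliary light grid; Pre_ excludes jagged grids containing a flashing cell, on which A raises IndexError or clips the spread by the flasher's own row length, an artefact of A's scatter bounds.
-- outside the precondition, e.g. on process_flash([[1, 10], [1, 1, 1]]): A returns [[2, 0], [2, 2, 1]], B returns [[2, 0], [2, 2, 2]]; on process_flash([[10, 1], [1]]): A raises IndexError, B returns [[0, 2], [2]]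
import Mathlib
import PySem

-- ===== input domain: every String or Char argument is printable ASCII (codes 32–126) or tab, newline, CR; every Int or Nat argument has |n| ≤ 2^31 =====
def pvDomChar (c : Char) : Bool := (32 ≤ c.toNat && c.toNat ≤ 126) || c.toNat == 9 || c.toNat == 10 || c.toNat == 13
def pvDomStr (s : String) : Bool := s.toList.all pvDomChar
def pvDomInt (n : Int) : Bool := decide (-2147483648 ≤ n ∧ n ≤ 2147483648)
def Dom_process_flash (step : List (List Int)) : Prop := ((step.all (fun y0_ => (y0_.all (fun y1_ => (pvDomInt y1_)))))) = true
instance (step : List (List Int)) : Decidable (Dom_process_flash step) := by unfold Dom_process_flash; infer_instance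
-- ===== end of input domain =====

-- B re-implements the flash step by gathering: it collects the list of flashing
-- cells once and, for each output cell, counts adjacent flashers from that list,
-- instead of A's scattering of +1 increments into an auxiliary light grid
-- (objective: alternative).  Both A and B zero the flashing cells of the
-- argument grid in place (the same observable mutation); the equivalence proved
-- here is about the return value.

-- ===== PORT A =====
-- shared low-level grid helpers (read a cell, +1 at a cell, zero a cell)
def pvGet2 (g : List (List Int)) (x y : Nat) : Int := (g.getD x []).getD y 0
def pvBump (g : List (List Int)) (x y : Nat) : List (List Int) :=
  g.modify x (fun r => r.modify y (· + 1))
def pvSet0 (g : List (List Int)) (x y : Nat) : List (List Int) :=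
  g.modify x (fun r => r.set y 0)

-- the y-1 / y+1 / y guarded increments A performs in row x' (A repeats this
-- block verbatim for x-1 and x+1)
def pvRowBump (l : List (List Int)) (x' y m : Nat) : List (List Int) :=
  let a := if 0 < y then pvBump l x' (y-1) else l
  let b := if y < m - 1 then pvBump a x' (y+1) else a
  pvBump b x' y

-- all `light` increments A performs for a flasher at (x,y), in A's order
def pvScatter (light : List (List Int)) (n x y m : Nat) : List (List Int) :=
  let l1 := if 0 < x then pvRowBump light (x-1) y m else light
  let l2 := if x < n - 1 then pvRowBump l1 (x+1) y m else l1
  let l3 := if 0 < y then pvBump l2 x (y-1) else l2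
  if y < m - 1 then pvBump l3 x (y+1) else l3

-- one iteration of A's inner loop body at (x,y); state = (light, step)
def pvBodyA (x y : Nat) (p : List (List Int) × List (List Int)) :
    List (List Int) × List (List Int) :=
  if pvGet2 p.2 x y ≤ 9 then p
  else (pvScatter p.1 p.2.length x y ((p.2.getD x []).length), pvSet0 p.2 x y)

def process_flash (step : List (List Int)) : List (List Int) :=
  let light0 := step.map (fun r => List.replicate r.length (0 : Int))
  let res := (List.range step.length).foldl (fun (p : List (List Int) × List (List Int)) x =>
      (List.range ((p.2.getD x []).length)).foldl (fun q y => pvBodyA x y q) p)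
    (light0, step)
  (List.range res.2.length).map (fun x =>
    (List.range ((res.2.getD x []).length)).map (fun y =>
      if pvGet2 res.2 x y ≠ 0 then pvGet2 res.2 x y + pvGet2 res.1 x y else 0))

-- ===== PORT B =====
-- Source B's adjacency test: abs(fx-x)<=1 and abs(fy-y)<=1 and (fx,fy)!=(x,y)
def pvAdjB (fx fy x y : Nat) : Bool :=
  ((fx : Int) - (x : Int)).natAbs ≤ 1 && ((fy : Int) - (y : Int)).natAbs ≤ 1 &&
    !(fx == x && fy == y)

def process_flash_alt (step : List (List Int)) : List (List Int) :=
  let flashes := (List.range step.length).flatMap (fun x =>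
      ((List.range ((step.getD x []).length)).filter
        (fun y => decide (9 < pvGet2 step x y))).map (fun y => (x, y)))
  let st := flashes.foldl (fun s cl => pvSet0 s cl.1 cl.2) step
  (List.range st.length).map (fun x =>
    (List.range ((st.getD x []).length)).map (fun y =>
      if pvGet2 st x y = 0 then 0
      else pvGet2 st x y + ((flashes.filter (fun cl => pvAdjB cl.1 cl.2 x y)).length : Int)))

-- ===== PRECONDITION & SPEC =====
-- Pre_ excludes jagged grids that contain a flashing cell: there A either
-- raises IndexError while scattering or spreads the flash through column bounds
-- taken from the flasher's own row, an artefact of A's implementation no caller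
-- would specify; B spreads to every existing neighbour instead.  Grids that are
-- rectangular, and jagged grids with nothing to flash, are all admitted.
def Pre_process_flash (step : List (List Int)) : Prop :=
  (∀ r ∈ step, r.length = (step.headD []).length) ∨ (∀ r ∈ step, ∀ v ∈ r, v ≤ 9)
instance (step : List (List Int)) : Decidable (Pre_process_flash step) := by
  unfold Pre_process_flash; infer_instance
def pvWitness_process_flash : List (List Int) := [[1, 10], [3, 4]]

def Spec_process_flash (step : List (List Int)) (out : List (List Int)) : Prop :=
  out = process_flash_alt step
instance (step : List (List Int)) (out : List (List Int)) : Decidable (Spec_process_flash step out) := by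
  unfold Spec_process_flash; infer_instance

-- ===== CLAIM (what is proved, stated in full; the proofs are below) =====
def Claim_equal_process_flash : Prop := ∀ (step : List (List Int)),
  Dom_process_flash step → Pre_process_flash step →
  Spec_process_flash step (process_flash step)

-- ===== LEMMAS AND PROOFS =====

-- the three neighbour columns A writes for a flasher at (x,y) exist in row i
def pvSafe (step : List (List Int)) (x y i : Nat) : Prop :=
  (0 < y → y - 1 < (step.getD i []).length) ∧
  (y < (step.getD x []).length - 1 → y + 1 < (step.getD i []).length) ∧
  y < (step.getD i []).length

-- the list of cell coordinates A's loops visit, flattened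
def pvCells (step : List (List Int)) : List (Nat × Nat) :=
  (List.range step.length).flatMap (fun x =>
    (List.range ((step.getD x []).length)).map (fun y => (x, y)))

-- grid shape: same outer length and same row lengths as `step`
def pvShapeM (step g : List (List Int)) : Prop :=
  g.length = step.length ∧ ∀ i, (g.getD i []).length = (step.getD i []).length

theorem pvAdjB_iff (fx fy x y : Nat) : pvAdjB fx fy x y = true ↔
    (((fx : Int) - (x : Int)).natAbs ≤ 1 ∧ ((fy : Int) - (y : Int)).natAbs ≤ 1 ∧
      ¬(fx = x ∧ fy = y)) := by
  simp [pvAdjB]; tauto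

-- basic getD/modify facts -----------------------------------------------------

theorem pvGet2_bump (g : List (List Int)) (x y i j : Nat) :
    pvGet2 (pvBump g x y) i j =
      pvGet2 g i j +
        if x = i ∧ y = j ∧ x < g.length ∧ y < (g.getD x []).length then 1 else 0 := by
  simp only [pvGet2, pvBump, List.getD_eq_getElem?_getD, List.getElem?_modify]
  by_cases hx : x = i
  · subst hx
    by_cases hxl : x < g.length
    · rw [List.getElem?_eq_getElem hxl]
      simp only [if_true, true_and, Option.map_some, Option.getD_some, Option.map_eq_map]
      rw [List.getElem?_modify]
      by_cases hy : y = j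
      · subst hy
        by_cases hyl : y < g[x].length
        · rw [List.getElem?_eq_getElem hyl]
          simp [hxl, hyl]
        · rw [List.getElem?_eq_none (by omega)]
          simp [hyl]
      · simp [hy]
    · rw [List.getElem?_eq_none (by omega : g.length ≤ x)]
      simp [hxl]
  · simp [fun h : x = i => hx h]

theorem pvGet2_set0 (g : List (List Int)) (x y i j : Nat) :
    pvGet2 (pvSet0 g x y) i j =
      if x = i ∧ y = j ∧ x < g.length ∧ y < (g.getD x []).length then 0
      else pvGet2 g i j := by
  simp only [pvGet2, pvSet0, List.getD_eq_getElem?_getD, List.getElem?_modify]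
  by_cases hx : x = i
  · subst hx
    by_cases hxl : x < g.length
    · rw [List.getElem?_eq_getElem hxl]
      simp only [if_true, true_and, Option.map_some, Option.getD_some, Option.map_eq_map]
      rw [List.getElem?_set]
      by_cases hy : y = j
      · subst hy
        rw [if_pos rfl]
        by_cases hyl : y < g[x].length
        · rw [if_pos hyl]
          simp [hxl, hyl]
        · rw [if_neg hyl, List.getElem?_eq_none (by omega)]
          simp [hyl]
      · rw [if_neg hy]
        simp [hy]
    · rw [List.getElem?_eq_none (by omega : g.length ≤ x)]
      simp [hxl]
  · simp [fun h : x = i => hx h]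

theorem pvShape_bump {step g : List (List Int)} (hs : pvShapeM step g) (x y : Nat) :
    pvShapeM step (pvBump g x y) := by
  refine ⟨by simp [pvBump, hs.1], fun i => ?_⟩
  rw [← hs.2 i]
  simp only [pvBump, List.getD_eq_getElem?_getD, List.getElem?_modify]
  by_cases h : x = i
  · subst h; cases hg : g[x]? <;> simp
  · simp [h]

theorem pvShape_set0 {step g : List (List Int)} (hs : pvShapeM step g) (x y : Nat) :
    pvShapeM step (pvSet0 g x y) := by
  refine ⟨by simp [pvSet0, hs.1], fun i => ?_⟩
  rw [← hs.2 i]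
  simp only [pvSet0, List.getD_eq_getElem?_getD, List.getElem?_modify]
  by_cases h : x = i
  · subst h; cases hg : g[x]? <;> simp
  · simp [h]

theorem pvGet2_bump_in {step g : List (List Int)} (hs : pvShapeM step g)
    {a b : Nat} (ha : a < step.length) (hb : b < (step.getD a []).length) (i j : Nat) :
    pvGet2 (pvBump g a b) i j = pvGet2 g i j + if a = i ∧ b = j then 1 else 0 := by
  rw [pvGet2_bump]
  have he : (a = i ∧ b = j ∧ a < g.length ∧ b < (g.getD a []).length) ↔ (a = i ∧ b = j) := by
    rw [hs.1, hs.2 a]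
    exact ⟨fun h => ⟨h.1, h.2.1⟩, fun h => ⟨h.1, h.2, ha, hb⟩⟩
  rw [if_congr he rfl rfl]

theorem pvGet2_bumpIf {step g : List (List Int)} (hs : pvShapeM step g)
    (P : Prop) [Decidable P] {a b : Nat}
    (hab : P → a < step.length ∧ b < (step.getD a []).length) (i j : Nat) :
    pvGet2 (if P then pvBump g a b else g) i j =
      pvGet2 g i j + if P ∧ a = i ∧ b = j then 1 else 0 := by
  by_cases hP : P
  · rw [if_pos hP, pvGet2_bump_in hs (hab hP).1 (hab hP).2]
    congr 1
    exact if_congr ⟨fun h => ⟨hP, h⟩, fun h => h.2⟩ rfl rfl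
  · rw [if_neg hP, if_neg (fun h => hP h.1)]
    ring

theorem pvShape_bumpIf {step g : List (List Int)} (hs : pvShapeM step g)
    (P : Prop) [Decidable P] (a b : Nat) :
    pvShapeM step (if P then pvBump g a b else g) := by
  split_ifs
  · exact pvShape_bump hs a b
  · exact hs

theorem pvShape_rowBump {step g : List (List Int)} (hs : pvShapeM step g)
    (x' y m : Nat) : pvShapeM step (pvRowBump g x' y m) := by
  unfold pvRowBump
  exact pvShape_bump (pvShape_bumpIf (pvShape_bumpIf hs _ _ _) _ _ _) _ _

theorem pvGet2_rowBump {step g : List (List Int)} (hs : pvShapeM step g)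
    {x' y mx : Nat} (hx' : x' < step.length)
    (ht1 : 0 < y → y - 1 < (step.getD x' []).length)
    (ht2 : y < mx - 1 → y + 1 < (step.getD x' []).length)
    (ht3 : y < (step.getD x' []).length) (i j : Nat) :
    pvGet2 (pvRowBump g x' y mx) i j =
      pvGet2 g i j + (if 0 < y ∧ x' = i ∧ y - 1 = j then 1 else 0)
        + (if y < mx - 1 ∧ x' = i ∧ y + 1 = j then 1 else 0)
        + (if x' = i ∧ y = j then 1 else 0) := by
  unfold pvRowBump
  rw [pvGet2_bump_in (pvShape_bumpIf (pvShape_bumpIf hs _ _ _) _ _ _) hx' ht3,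
    pvGet2_bumpIf (pvShape_bumpIf hs _ _ _) _ (fun h => ⟨hx', ht2 h⟩),
    pvGet2_bumpIf hs _ (fun h => ⟨hx', ht1 h⟩)]

theorem pvShape_rowBumpIf {step g : List (List Int)} (hs : pvShapeM step g)
    (P : Prop) [Decidable P] (x' y m : Nat) :
    pvShapeM step (if P then pvRowBump g x' y m else g) := by
  split_ifs
  · exact pvShape_rowBump hs x' y m
  · exact hs

theorem pvGet2_rowBumpIf {step g : List (List Int)} (hs : pvShapeM step g)
    (P : Prop) [Decidable P] {x' y mx : Nat} (hx' : P → x' < step.length)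
    (ht : P → (0 < y → y - 1 < (step.getD x' []).length) ∧
      (y < mx - 1 → y + 1 < (step.getD x' []).length) ∧
      y < (step.getD x' []).length) (i j : Nat) :
    pvGet2 (if P then pvRowBump g x' y mx else g) i j =
      pvGet2 g i j + (if P ∧ 0 < y ∧ x' = i ∧ y - 1 = j then 1 else 0)
        + (if P ∧ y < mx - 1 ∧ x' = i ∧ y + 1 = j then 1 else 0)
        + (if P ∧ x' = i ∧ y = j then 1 else 0) := by
  by_cases hP : P
  · rw [if_pos hP,
      pvGet2_rowBump hs (hx' hP) (ht hP).1 (ht hP).2.1 (ht hP).2.2]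
    simp [hP]
  · rw [if_neg hP]
    simp [hP]

-- indicator arithmetic for the 8 neighbour increments --------------------------

theorem pvRowSum (P : Prop) [Decidable P] (x' y c i j : Nat) (hy : y < c) :
    (if P ∧ 0 < y ∧ x' = i ∧ y - 1 = j then (1:Int) else 0)
      + (if P ∧ y < c - 1 ∧ x' = i ∧ y + 1 = j then 1 else 0)
      + (if P ∧ x' = i ∧ y = j then 1 else 0)
    = if P ∧ x' = i ∧ j < c ∧ ((j:Int) - (y:Int)).natAbs ≤ 1 then 1 else 0 := by
  by_cases hP : P
  · simp only [hP, true_and]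
    split_ifs <;> omega
  · simp [hP]

theorem pvRowSum2 (x y c i j : Nat) (hy : y < c) :
    (if 0 < y ∧ x = i ∧ y - 1 = j then (1:Int) else 0)
      + (if y < c - 1 ∧ x = i ∧ y + 1 = j then 1 else 0)
    = if x = i ∧ j < c ∧ ((j:Int) - (y:Int)).natAbs ≤ 1 ∧ j ≠ y then 1 else 0 := by
  split_ifs <;> omega

theorem pvRowCombine (n c x y i j : Nat) (hx : x < n) (hy : y < c) :
    (if (0 < x) ∧ x - 1 = i ∧ j < c ∧ ((j:Int) - (y:Int)).natAbs ≤ 1 then (1:Int) else 0)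
      + (if (x < n - 1) ∧ x + 1 = i ∧ j < c ∧ ((j:Int) - (y:Int)).natAbs ≤ 1 then 1 else 0)
      + (if x = i ∧ j < c ∧ ((j:Int) - (y:Int)).natAbs ≤ 1 ∧ j ≠ y then 1 else 0)
    = if i < n ∧ j < c ∧ pvAdjB x y i j = true then 1 else 0 := by
  simp only [pvAdjB_iff]
  split_ifs <;> omega

theorem pvGet2_scatter {step light : List (List Int)} (hs : pvShapeM step light)
    {x y : Nat} (hx : x < step.length) (hy : y < (step.getD x []).length)
    (hsf1 : 0 < x → pvSafe step x y (x-1))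
    (hsf2 : x + 1 < step.length → pvSafe step x y (x+1)) (i j : Nat) :
    pvGet2 (pvScatter light step.length x y ((step.getD x []).length)) i j =
      pvGet2 light i j +
        if i < step.length ∧ j < (step.getD x []).length ∧ pvAdjB x y i j = true
        then 1 else 0 := by
  have s1 : pvShapeM step (if 0 < x then pvRowBump light (x-1) y ((step.getD x []).length) else light) :=
    pvShape_rowBumpIf hs _ _ _ _
  have s2 : pvShapeM step (if x < step.length - 1 then
      pvRowBump (if 0 < x then pvRowBump light (x-1) y ((step.getD x []).length) else light)
        (x+1) y ((step.getD x []).length)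
      else (if 0 < x then pvRowBump light (x-1) y ((step.getD x []).length) else light)) :=
    pvShape_rowBumpIf s1 _ _ _ _
  have s3 := pvShape_bumpIf s2 (0 < y) x (y-1)
  unfold pvScatter
  rw [pvGet2_bumpIf s3 _ (fun h' => ⟨hx, by omega⟩),
    pvGet2_bumpIf s2 _ (fun h' => ⟨hx, by omega⟩),
    pvGet2_rowBumpIf s1 _ (fun h' => by omega) (fun h' => hsf2 (by omega)),
    pvGet2_rowBumpIf hs _ (fun h' => by omega) (fun h' => hsf1 h')]
  have e1 := pvRowSum (0 < x) (x-1) y ((step.getD x []).length) i j hy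
  have e2 := pvRowSum (x < step.length - 1) (x+1) y ((step.getD x []).length) i j hy
  have e3 := pvRowSum2 x y ((step.getD x []).length) i j hy
  have e4 := pvRowCombine step.length ((step.getD x []).length) x y i j hx hy
  linarith [e1, e2, e3, e4]

theorem pvShape_scatter {step light : List (List Int)} (hs : pvShapeM step light)
    (n' x y m : Nat) : pvShapeM step (pvScatter light n' x y m) := by
  unfold pvScatter
  exact pvShape_bumpIf (pvShape_bumpIf (pvShape_rowBumpIf (pvShape_rowBumpIf hs _ _ _ _) _ _ _ _) _ _ _) _ _ _

-- fold invariant machinery ----------------------------------------------------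

theorem pvFoldl_inv {α β : Type} (f : β → α → β) (P : β → Prop)
    (h : ∀ b a, P b → P (f b a)) : ∀ (l : List α) (b : β), P b → P (l.foldl f b) := by
  intro l
  induction l with
  | nil => intro b hb; exact hb
  | cons a l ih => intro b hb; exact ih _ (h b a hb)

theorem pvShape_bodyA {step : List (List Int)} {p : List (List Int) × List (List Int)}
    (h1 : pvShapeM step p.1) (h2 : pvShapeM step p.2) (x y : Nat) :
    pvShapeM step (pvBodyA x y p).1 ∧ pvShapeM step (pvBodyA x y p).2 := by
  unfold pvBodyA
  split_ifs with h
  · exact ⟨h1, h2⟩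
  · exact ⟨pvShape_scatter h1 _ _ _ _, pvShape_set0 h2 _ _⟩

-- A's nested loops equal a single fold over the flattened cell list -----------

theorem pvNested_eq_flat (step : List (List Int)) :
    ∀ (xs : List Nat) (p : List (List Int) × List (List Int)),
      pvShapeM step p.1 → pvShapeM step p.2 →
      xs.foldl (fun (p : List (List Int) × List (List Int)) x =>
          (List.range ((p.2.getD x []).length)).foldl (fun q y => pvBodyA x y q) p) p
      = ((xs.flatMap fun x =>
          (List.range ((step.getD x []).length)).map (fun y => (x, y))).foldl
            (fun (q : List (List Int) × List (List Int)) cl => pvBodyA cl.1 cl.2 q) p) := by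
  intro xs
  induction xs with
  | nil => intro p _ _; rfl
  | cons x xs ih =>
    intro p h1 h2
    have hrow : (p.2.getD x []).length = (step.getD x []).length := h2.2 x
    simp only [List.foldl_cons, List.flatMap_cons, List.foldl_append, List.foldl_map]
    rw [hrow]
    have hpres : pvShapeM step ((List.range ((step.getD x []).length)).foldl
        (fun q y => pvBodyA x y q) p).1 ∧
        pvShapeM step ((List.range ((step.getD x []).length)).foldl
        (fun q y => pvBodyA x y q) p).2 := by
      refine pvFoldl_inv _
        (fun (q : List (List Int) × List (List Int)) => pvShapeM step q.1 ∧ pvShapeM step q.2)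
        (fun q y hq => pvShape_bodyA hq.1 hq.2 x y) _ _ ⟨h1, h2⟩
    exact ih _ hpres.1 hpres.2

-- counting helper: the per-(i,j) flasher-neighbour count over a cell list
def pvCnt (step : List (List Int)) (L : List (Nat × Nat)) (i j : Nat) : Int :=
  ((L.filter (fun cl => decide (9 < pvGet2 step cl.1 cl.2) &&
      (decide (i < step.length) && decide (j < (step.getD cl.1 []).length)
        && pvAdjB cl.1 cl.2 i j))).length : Int)

-- the main invariant: folding A's body over a nodup in-bounds cell list
theorem pvFlat_inv (step : List (List Int)) :
    ∀ (L : List (Nat × Nat)), L.Nodup →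
      (∀ cl ∈ L, cl.1 < step.length ∧ cl.2 < (step.getD cl.1 []).length) →
      (∀ cl ∈ L, 9 < pvGet2 step cl.1 cl.2 →
        (0 < cl.1 → pvSafe step cl.1 cl.2 (cl.1-1)) ∧
        (cl.1 + 1 < step.length → pvSafe step cl.1 cl.2 (cl.1+1))) →
      ∀ (light st : List (List Int)),
        pvShapeM step light → pvShapeM step st →
        (∀ cl ∈ L, pvGet2 st cl.1 cl.2 = pvGet2 step cl.1 cl.2) →
        (∀ i j, pvGet2 (L.foldl (fun (q : List (List Int) × List (List Int)) cl => pvBodyA cl.1 cl.2 q) (light, st)).1 i j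
            = pvGet2 light i j + pvCnt step L i j)
        ∧ (∀ i j, pvGet2 (L.foldl (fun (q : List (List Int) × List (List Int)) cl => pvBodyA cl.1 cl.2 q) (light, st)).2 i j
            = if (i, j) ∈ L ∧ 9 < pvGet2 step i j then 0 else pvGet2 st i j)
        ∧ pvShapeM step (L.foldl (fun (q : List (List Int) × List (List Int)) cl => pvBodyA cl.1 cl.2 q) (light, st)).1
        ∧ pvShapeM step (L.foldl (fun (q : List (List Int) × List (List Int)) cl => pvBodyA cl.1 cl.2 q) (light, st)).2 := by
  intro L
  induction L with
  | nil =>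
    intro _ _ _ light st hl hs _
    exact ⟨fun i j => by simp [pvCnt], fun i j => by simp, hl, hs⟩
  | cons cl L ih =>
    intro hnd hbnd hsafe light st hl hs hagree
    obtain ⟨x, y⟩ := cl
    have hx : x < step.length := (hbnd (x, y) List.mem_cons_self).1
    have hy : y < (step.getD x []).length := (hbnd (x, y) List.mem_cons_self).2
    have hnotmem : (x, y) ∉ L := (List.nodup_cons.1 hnd).1
    have hagree0 : pvGet2 st x y = pvGet2 step x y := hagree _ List.mem_cons_self
    simp only [List.foldl_cons]
    by_cases hfl : pvGet2 step x y ≤ 9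
    · -- no flash at (x,y): the body is the identity
      have hbody : pvBodyA x y (light, st) = (light, st) := by
        unfold pvBodyA
        exact if_pos (by rw [hagree0]; exact hfl)
      rw [hbody]
      obtain ⟨g1, g2, g3, g4⟩ := ih (List.nodup_cons.1 hnd).2
        (fun d hd => hbnd d (List.mem_cons_of_mem _ hd))
        (fun d hd => hsafe d (List.mem_cons_of_mem _ hd)) light st hl hs
        (fun d hd => hagree d (List.mem_cons_of_mem _ hd))
      refine ⟨fun i j => ?_, fun i j => ?_, g3, g4⟩
      · rw [g1 i j]
        have hcnt : pvCnt step ((x, y) :: L) i j = pvCnt step L i j := by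
          unfold pvCnt
          rw [List.filter_cons_of_neg (fun hcontra => by
            simp only [Bool.and_eq_true, decide_eq_true_eq] at hcontra
            omega)]
        rw [hcnt]
      · rw [g2 i j]
        by_cases hm : (i, j) ∈ L
        · simp [hm]
        · have he : ((i, j) ∈ (x, y) :: L ∧ 9 < pvGet2 step i j) ↔
              ((i, j) ∈ L ∧ 9 < pvGet2 step i j) := by
            constructor
            · rintro ⟨hmem, hgt⟩
              rcases List.mem_cons.1 hmem with h | h
              · exfalso
                rw [Prod.mk.injEq] at h
                obtain ⟨h1, h2⟩ := h
                subst h1; subst h2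
                omega
              · exact ⟨h, hgt⟩
            · rintro ⟨hmem, hgt⟩; exact ⟨List.mem_cons_of_mem _ hmem, hgt⟩
          rw [if_congr he rfl rfl]
    · -- flash at (x,y)
      push_neg at hfl
      have hbody : pvBodyA x y (light, st)
          = (pvScatter light step.length x y ((step.getD x []).length), pvSet0 st x y) := by
        unfold pvBodyA
        rw [if_neg (by simp only; rw [hagree0]; omega)]
        simp only
        rw [hs.1, hs.2 x]
      rw [hbody]
      have hsf := hsafe (x, y) List.mem_cons_self hfl
      have hl' : pvShapeM step (pvScatter light step.length x y ((step.getD x []).length)) :=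
        pvShape_scatter hl _ _ _ _
      have hs' : pvShapeM step (pvSet0 st x y) := pvShape_set0 hs x y
      have hagree' : ∀ d ∈ L, pvGet2 (pvSet0 st x y) d.1 d.2 = pvGet2 step d.1 d.2 := by
        intro d hd
        rw [pvGet2_set0, if_neg]
        · exact hagree d (List.mem_cons_of_mem _ hd)
        · rintro ⟨h1, h2, _⟩
          exact hnotmem (by rw [show (x, y) = d from Prod.ext h1 h2]; exact hd)
      obtain ⟨g1, g2, g3, g4⟩ := ih (List.nodup_cons.1 hnd).2
        (fun d hd => hbnd d (List.mem_cons_of_mem _ hd))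
        (fun d hd => hsafe d (List.mem_cons_of_mem _ hd))
        (pvScatter light step.length x y ((step.getD x []).length)) (pvSet0 st x y)
        hl' hs' hagree'
      refine ⟨fun i j => ?_, fun i j => ?_, g3, g4⟩
      · rw [g1 i j, pvGet2_scatter hl hx hy hsf.1 hsf.2 i j]
        have hcnt : pvCnt step ((x, y) :: L) i j =
            (if i < step.length ∧ j < (step.getD x []).length ∧ pvAdjB x y i j = true
              then 1 else 0) + pvCnt step L i j := by
          unfold pvCnt
          by_cases hc : i < step.length ∧ j < (step.getD x []).length ∧ pvAdjB x y i j = true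
          · rw [List.filter_cons_of_pos (by
              simp only [Bool.and_eq_true, decide_eq_true_eq]
              exact ⟨hfl, ⟨hc.1, hc.2.1⟩, hc.2.2⟩), if_pos hc]
            simp only [List.length_cons]
            push_cast
            ring
          · rw [List.filter_cons_of_neg (fun hcontra => by
              simp only [Bool.and_eq_true, decide_eq_true_eq] at hcontra
              exact hc ⟨hcontra.2.1.1, hcontra.2.1.2, hcontra.2.2⟩), if_neg hc]
            ring_nf
        rw [hcnt]
        ring
      · rw [g2 i j, pvGet2_set0]
        rw [hs.1, hs.2 x]
        by_cases hm : (i, j) ∈ L ∧ 9 < pvGet2 step i j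
        · simp [hm, List.mem_cons_of_mem _ hm.1]
        · rw [if_neg hm]
          by_cases hij : x = i ∧ y = j
          · obtain ⟨h1, h2⟩ := hij
            subst h1; subst h2
            rw [if_pos ⟨rfl, rfl, hx, hy⟩, if_pos ⟨List.mem_cons_self, hfl⟩]
          · rw [if_neg (by rintro ⟨h1, h2, _⟩; exact hij ⟨h1, h2⟩), if_neg]
            rintro ⟨hmem, hgt⟩
            rcases List.mem_cons.1 hmem with h | h
            · rw [Prod.mk.injEq] at h
              exact hij ⟨h.1.symm, h.2.symm⟩
            · exact hm ⟨h, hgt⟩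

-- cells list: membership and nodup --------------------------------------------

theorem pvMem_cells (step : List (List Int)) (i j : Nat) :
    (i, j) ∈ pvCells step ↔ i < step.length ∧ j < (step.getD i []).length := by
  simp only [pvCells, List.mem_flatMap, List.mem_map, List.mem_range]
  constructor
  · rintro ⟨x, hx, y, hy, h⟩
    rw [Prod.mk.injEq] at h
    obtain ⟨h1, h2⟩ := h
    subst h1; subst h2
    exact ⟨hx, hy⟩
  · rintro ⟨h1, h2⟩
    exact ⟨i, h1, j, h2, rfl⟩

theorem pvNodup_tag (m : Nat → Nat) :
    ∀ xs : List Nat, xs.Nodup →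
      (xs.flatMap fun x => (List.range (m x)).map (fun y => (x, y))).Nodup := by
  intro xs
  induction xs with
  | nil => intro _; rw [List.flatMap_nil]; exact List.nodup_nil
  | cons x xs ih =>
    intro hnd
    simp only [List.flatMap_cons]
    rw [List.nodup_append]
    refine ⟨?_, ih (List.nodup_cons.1 hnd).2, ?_⟩
    · exact (List.nodup_range).map (fun a b h => by simpa using congrArg Prod.snd h)
    · intro a ha b hb hab
      simp only [List.mem_map, List.mem_range] at ha
      obtain ⟨y, _, hay⟩ := ha
      simp only [List.mem_flatMap, List.mem_map, List.mem_range] at hb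
      obtain ⟨x', hx', y', _, hby⟩ := hb
      apply (List.nodup_cons.1 hnd).1
      rw [← hay, ← hby] at hab
      have hxx : x = x' := congrArg Prod.fst hab
      exact hxx ▸ hx'

theorem pvCells_nodup (step : List (List Int)) : (pvCells step).Nodup :=
  pvNodup_tag (fun x => (step.getD x []).length) _ List.nodup_range

-- B's zeroing fold ------------------------------------------------------------

theorem pvSet0_fold (step : List (List Int)) :
    ∀ (L : List (Nat × Nat)) (st : List (List Int)), pvShapeM step st →
      (∀ cl ∈ L, cl.1 < step.length ∧ cl.2 < (step.getD cl.1 []).length) →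
      (∀ i j, pvGet2 (L.foldl (fun s cl => pvSet0 s cl.1 cl.2) st) i j
          = if (i, j) ∈ L then 0 else pvGet2 st i j)
      ∧ pvShapeM step (L.foldl (fun s cl => pvSet0 s cl.1 cl.2) st) := by
  intro L
  induction L with
  | nil => intro st hs _; exact ⟨fun i j => by simp, hs⟩
  | cons cl L ih =>
    intro st hs hbnd
    obtain ⟨x, y⟩ := cl
    have hx : x < step.length := (hbnd (x, y) List.mem_cons_self).1
    have hy : y < (step.getD x []).length := (hbnd (x, y) List.mem_cons_self).2
    have hs' : pvShapeM step (pvSet0 st x y) := pvShape_set0 hs x y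
    obtain ⟨g1, g2⟩ := ih (pvSet0 st x y) hs'
      (fun d hd => hbnd d (List.mem_cons_of_mem _ hd))
    refine ⟨fun i j => ?_, by simpa using g2⟩
    simp only [List.foldl_cons]
    rw [g1 i j, pvGet2_set0, hs.1, hs.2 x]
    by_cases hm : (i, j) ∈ L
    · rw [if_pos hm, if_pos (List.mem_cons_of_mem _ hm)]
    · rw [if_neg hm]
      by_cases hij : x = i ∧ y = j
      · obtain ⟨h1, h2⟩ := hij
        subst h1; subst h2
        rw [if_pos ⟨rfl, rfl, hx, hy⟩, if_pos List.mem_cons_self]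
      · rw [if_neg (by rintro ⟨h1, h2, _⟩; exact hij ⟨h1, h2⟩), if_neg (by
          intro hmem
          rcases List.mem_cons.1 hmem with h | h
          · rw [Prod.mk.injEq] at h
            exact hij ⟨h.1.symm, h.2.symm⟩
          · exact hm h)]

-- B's flash list is the filtered cell list ------------------------------------

theorem pvFlashes_eq (step : List (List Int)) :
    ((List.range step.length).flatMap (fun x =>
      ((List.range ((step.getD x []).length)).filter
        (fun y => decide (9 < pvGet2 step x y))).map (fun y => (x, y))))
    = (pvCells step).filter (fun cl => decide (9 < pvGet2 step cl.1 cl.2)) := by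
  unfold pvCells
  rw [List.filter_flatMap]
  exact congrArg (fun f => List.flatMap f (List.range step.length))
    (funext fun x => by rw [List.filter_map]; rfl)

-- the nested-to-flat corollary phrased with pvCells ----------------------------

theorem pvNested_eq_cells (step : List (List Int))
    (p : List (List Int) × List (List Int))
    (h1 : pvShapeM step p.1) (h2 : pvShapeM step p.2) :
    (List.range step.length).foldl (fun (p : List (List Int) × List (List Int)) x =>
        (List.range ((p.2.getD x []).length)).foldl (fun q y => pvBodyA x y q) p) p
    = (pvCells step).foldl (fun (q : List (List Int) × List (List Int)) cl => pvBodyA cl.1 cl.2 q) p := by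
  rw [pvNested_eq_flat step (List.range step.length) p h1 h2]
  rfl

-- shape and zero-ness of A's initial light grid --------------------------------

theorem pvShape_light0 (step : List (List Int)) :
    pvShapeM step (step.map fun r => List.replicate r.length (0 : Int)) := by
  refine ⟨by simp, fun i => ?_⟩
  simp only [List.getD_eq_getElem?_getD, List.getElem?_map]
  cases hg : step[i]? <;> simp

theorem pvGet2_light0 (step : List (List Int)) (i j : Nat) :
    pvGet2 (step.map fun r => List.replicate r.length (0 : Int)) i j = 0 := by
  simp only [pvGet2, List.getD_eq_getElem?_getD, List.getElem?_map]
  cases hg : step[i]? with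
  | none => simp
  | some r =>
    simp only [Option.map_some, Option.getD_some]
    by_cases hj : j < r.length
    · rw [List.getElem?_eq_getElem (by simpa using hj)]
      simp
    · rw [List.getElem?_eq_none (by simpa using hj)]
      simp

-- the row getD reads at an in-range index is a member of the grid
theorem pvGetD_mem (step : List (List Int)) {i : Nat} (hi : i < step.length) :
    step.getD i [] ∈ step := by
  rw [List.getD_eq_getElem step [] hi]
  exact List.getElem_mem hi

-- under Pre_, any two rows carrying an in-range flasher column and an in-range
-- live column have compatible lengths: the flasher's row reaches column y
theorem pvPre_colY (step : List (List Int)) (hpre : Pre_process_flash step)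
    {x y a b : Nat} (hx : x < step.length) (hy : y < (step.getD x []).length)
    (ha : a < step.length) (hb : b < (step.getD a []).length)
    (hfl : 9 < pvGet2 step a b) : y < (step.getD a []).length := by
  rcases hpre with hrect | hsmall
  · have h1 := hrect _ (pvGetD_mem step hx)
    have h2 := hrect _ (pvGetD_mem step ha)
    omega
  · exfalso
    have hv : (step.getD a []).getD b 0 ∈ step.getD a [] := by
      rw [List.getD_eq_getElem _ _ hb]
      exact List.getElem_mem hb
    have := hsmall _ (pvGetD_mem step ha) _ hv
    exact absurd hfl (by simpa [pvGet2] using this)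

-- under Pre_, every in-bounds flasher's scatter targets are in range
theorem pvPre_safe (step : List (List Int)) (hpre : Pre_process_flash step) :
    ∀ x ∈ List.range step.length, ∀ y ∈ List.range ((step.getD x []).length),
      9 < pvGet2 step x y →
      (0 < x → pvSafe step x y (x-1)) ∧
      (x + 1 < step.length → pvSafe step x y (x+1)) := by
  intro x hx y hy hfl
  rw [List.mem_range] at hx hy
  rcases hpre with hrect | hsmall
  · have hl : ∀ i, i < step.length → (step.getD i []).length = (step.getD x []).length := by
      intro i hi
      have h1 := hrect _ (pvGetD_mem step hi)
      have h2 := hrect _ (pvGetD_mem step hx)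
      omega
    constructor
    · intro hx0
      have h1 := hl (x-1) (by omega)
      unfold pvSafe
      rw [h1]
      omega
    · intro hx1
      have h1 := hl (x+1) (by omega)
      unfold pvSafe
      rw [h1]
      omega
  · exfalso
    have hv : (step.getD x []).getD y 0 ∈ step.getD x [] := by
      rw [List.getD_eq_getElem _ _ hy]
      exact List.getElem_mem hy
    have := hsmall _ (pvGetD_mem step hx) _ hv
    exact absurd hfl (by simpa [pvGet2] using this)

-- ===== VERDICT (by name: the statement is the Claim_ definition above) =====
theorem process_flash_spec : Claim_equal_process_flash := by
  unfold Claim_equal_process_flash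
  intro step _ hpre
  unfold Spec_process_flash
  have hstep : pvShapeM step step := ⟨rfl, fun _ => rfl⟩
  have hl0 := pvShape_light0 step
  have hcells_bnd : ∀ cl ∈ pvCells step,
      cl.1 < step.length ∧ cl.2 < (step.getD cl.1 []).length := by
    intro cl hcl
    obtain ⟨i, j⟩ := cl
    exact (pvMem_cells step i j).1 hcl
  have hsafeL : ∀ cl ∈ pvCells step, 9 < pvGet2 step cl.1 cl.2 →
      (0 < cl.1 → pvSafe step cl.1 cl.2 (cl.1-1)) ∧
      (cl.1 + 1 < step.length → pvSafe step cl.1 cl.2 (cl.1+1)) := by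
    intro cl hcl hgt
    obtain ⟨h1, h2⟩ := hcells_bnd cl hcl
    exact pvPre_safe step hpre cl.1 (List.mem_range.2 h1) cl.2 (List.mem_range.2 h2) hgt
  obtain ⟨a1, a2, a3, a4⟩ := pvFlat_inv step
    (pvCells step) (pvCells_nodup step) hcells_bnd hsafeL
    (step.map fun r => List.replicate r.length (0 : Int)) step hl0 hstep
    (fun _ _ => rfl)
  obtain ⟨b1, b2⟩ := pvSet0_fold step
    ((pvCells step).filter (fun cl => decide (9 < pvGet2 step cl.1 cl.2))) step hstep
    (fun cl hcl => hcells_bnd cl (List.mem_of_mem_filter hcl))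
  simp only [process_flash, process_flash_alt]
  rw [pvNested_eq_cells step _ hl0 hstep]
  rw [pvFlashes_eq step]
  rw [a4.1, b2.1]
  refine List.map_congr_left (fun x hx => ?_)
  rw [List.mem_range] at hx
  rw [a4.2 x, b2.2 x]
  refine List.map_congr_left (fun y hy => ?_)
  rw [List.mem_range] at hy
  have hmem : (x, y) ∈ pvCells step := (pvMem_cells step x y).2 ⟨hx, hy⟩
  have hvA : pvGet2 ((pvCells step).foldl
      (fun (q : List (List Int) × List (List Int)) cl => pvBodyA cl.1 cl.2 q)
      (step.map fun r => List.replicate r.length (0 : Int), step)).2 x y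
      = if 9 < pvGet2 step x y then 0 else pvGet2 step x y := by
    rw [a2 x y, if_congr (and_iff_right hmem) rfl rfl]
  have hvB : pvGet2 (((pvCells step).filter
        (fun cl => decide (9 < pvGet2 step cl.1 cl.2))).foldl
        (fun s cl => pvSet0 s cl.1 cl.2) step) x y
      = if 9 < pvGet2 step x y then 0 else pvGet2 step x y := by
    rw [b1 x y]
    by_cases hf : 9 < pvGet2 step x y
    · rw [if_pos (List.mem_filter.2 ⟨hmem, by simpa using hf⟩), if_pos hf]
    · rw [if_neg (fun hmf => hf (by simpa using (List.mem_filter.1 hmf).2)),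
        if_neg hf]
  rw [hvA, hvB]
  by_cases h0 : (if 9 < pvGet2 step x y then 0 else pvGet2 step x y) = 0
  · rw [h0]
    simp
  · rw [if_pos h0, if_neg h0]
    congr 1
    -- the two counts agree: under Pre_ the extra bound in A's count is free
    rw [a1 x y, pvGet2_light0, List.filter_filter]
    unfold pvCnt
    rw [List.filter_congr (fun cl hcl => ?_)]
    · ring
    · have hclb := hcells_bnd cl hcl
      by_cases hfl : 9 < pvGet2 step cl.1 cl.2
      · by_cases hadj : pvAdjB cl.1 cl.2 x y = true
        · have hyb := pvPre_colY step hpre hx hy hclb.1 hclb.2 hfl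
          simp [hfl, hadj, hx]
          simpa [List.getD_eq_getElem?_getD] using hyb
        · simp [hadj]
      · simp [hfl]
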